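-- pv_equiv track=rewrite | github.com/seliavci/CRM-Temsilci-Yonlendirme | crm_temsilci_yonlendirme.py | destek_temsilcisi_yonlendirme
-- ===== SOURCE A (Python) =====
-- def destek_temsilcisi_yonlendirme(musteri_talepleri, temsilciler, n, m):
--     # DP Tablosu: dp[i][j] = i. müşteri talebine kadar ve j. temsilcinin uygunluğu altında en iyi yönlendirme
--     dp = [[0] * (m + 1) for _ in range(n + 1)]
--
--     # Dinamik programlama geçişleri
--     for i in range(1, n + 1):  # Müşteri talepleri
--         for j in range(1, m + 1):  # Temsilciler
--             if temsilciler[j - 1] >= musteri_talepleri[i - 1]:  # Temsilci, talebi karşılayabiliyorsa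
--                 dp[i][j] = max(dp[i - 1][j], dp[i - 1][j - 1] + musteri_talepleri[i - 1])
--             else:
--                 dp[i][j] = dp[i - 1][j]  # Temsilciyi kullanmıyoruz
--
--     # En yüksek talep karşılanma oranı
--     en_yuksek_talepler = dp[n][m]
--
--     # Hangi temsilcilerin seçildiğini bulma
--     temsilciler_secildi = []
--     j = m
--     for i in range(n, 0, -1):
--         if dp[i][j] != dp[i - 1][j]:  # Temsilci seçildiyse
--             temsilciler_secildi.append(j - 1)
--             j -= 1
--
--     temsilciler_secildi.reverse()
--     return en_yuksek_talepler, temsilciler_secildi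
-- ===== SOURCE B (Python) =====
-- def destek_temsilcisi_yonlendirme(musteri_talepleri, temsilciler, n, m):
--     # Top-down instead of bottom-up: a memoized recursive value function best(i, j)
--     # (no DP table is ever built), and the chosen agents are reconstructed by a
--     # second recursion reading the memoized values, instead of scanning table rows.
--     memo = {}
--     memo_get = memo.get
--
--     def best(i, j):
--         if i == 0 or j == 0:
--             return 0
--         v = memo_get((i, j))
--         if v is None:
--             v = best(i - 1, j)
--             if temsilciler[j - 1] >= musteri_talepleri[i - 1]:
--                 v = max(v, best(i - 1, j - 1) + musteri_talepleri[i - 1])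
--             memo[(i, j)] = v
--         return v
--
--     def pick(i, j):
--         if i == 0 or j == 0:
--             return []
--         if temsilciler[j - 1] >= musteri_talepleri[i - 1] and \
--                 best(i - 1, j - 1) + musteri_talepleri[i - 1] > best(i - 1, j):
--             return pick(i - 1, j - 1) + [j - 1]
--         return pick(i - 1, j)
--
--     return best(n, m), pick(n, m)
-- ===== Notes on version B (the rewrite author's own statement) =====
-- stated objective: alternative
-- what changed: Replaces A's bottom-up 2D DP table and its table-scanning traceback loop by a top-down memoized recursion best(i,j) for the value (no table is built, a dict caches only the visited cells) plus a separate recursion pick(i,j) that reconstructs the selected agents directly from the recurrence, building the list front-to-back with no reverse.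
import Mathlib
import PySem

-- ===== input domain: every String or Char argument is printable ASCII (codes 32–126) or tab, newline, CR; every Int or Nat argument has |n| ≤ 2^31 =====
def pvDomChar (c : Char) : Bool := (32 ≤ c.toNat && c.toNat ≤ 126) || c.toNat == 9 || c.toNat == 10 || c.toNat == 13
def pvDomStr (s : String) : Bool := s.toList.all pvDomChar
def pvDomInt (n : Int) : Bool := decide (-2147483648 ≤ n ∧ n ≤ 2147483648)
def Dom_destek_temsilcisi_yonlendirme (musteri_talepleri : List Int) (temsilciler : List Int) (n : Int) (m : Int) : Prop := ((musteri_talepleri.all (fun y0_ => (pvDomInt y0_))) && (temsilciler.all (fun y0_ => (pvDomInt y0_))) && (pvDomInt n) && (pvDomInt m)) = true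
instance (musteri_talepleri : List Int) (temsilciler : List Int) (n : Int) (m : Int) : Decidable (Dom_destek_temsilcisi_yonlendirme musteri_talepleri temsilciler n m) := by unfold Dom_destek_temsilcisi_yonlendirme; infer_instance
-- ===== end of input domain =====

-- B replaces A's bottom-up 2D DP table and table-scanning traceback by a top-down memoized
-- recursion for the value plus a recursion reconstructing the selected agents directly;
-- objective: alternative (same O(n·m) cost, different decomposition and data structure).
-- Neither version mutates its arguments.

-- ===== PORT A =====
-- Indexing is via pyGetD (Python xs[k] with a default); under Pre_ every index read is in
-- range, so the default is never used and the port is exact.  The writes dp[i][j] = v have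
-- 1 ≤ i ≤ n and 1 ≤ j ≤ m from the ranges, so List.set at i.toNat / j.toNat is exact too.
-- Each loop of the Python is one named fold below, in the same order with the same state.
def pvA_dp0 (n m : Int) : List (List Int) :=
  (PySem.List.pyRange 0 (n+1) 1).map (fun _ => List.replicate (m+1).toNat 0)

def pvA_cell (mt ts : List Int) (dp : List (List Int)) (i j : Int) : Int :=
  if PySem.List.pyGetD ts (j-1) 0 ≥ PySem.List.pyGetD mt (i-1) 0 then
    max (PySem.List.pyGetD (PySem.List.pyGetD dp (i-1) []) j 0)
        (PySem.List.pyGetD (PySem.List.pyGetD dp (i-1) []) (j-1) 0 + PySem.List.pyGetD mt (i-1) 0)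
  else PySem.List.pyGetD (PySem.List.pyGetD dp (i-1) []) j 0

def pvA_inner (mt ts : List Int) (m i : Int) (dp : List (List Int)) : List (List Int) :=
  (PySem.List.pyRange 1 (m+1) 1).foldl
    (fun dp j => dp.set i.toNat ((PySem.List.pyGetD dp i []).set j.toNat (pvA_cell mt ts dp i j))) dp

def pvA_table (mt ts : List Int) (n m : Int) : List (List Int) :=
  (PySem.List.pyRange 1 (n+1) 1).foldl (fun dp i => pvA_inner mt ts m i dp) (pvA_dp0 n m)

def pvA_tstep (dp : List (List Int)) (st : Int × List Int) (i : Int) : Int × List Int :=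
  if PySem.List.pyGetD (PySem.List.pyGetD dp i []) st.1 0 ≠ PySem.List.pyGetD (PySem.List.pyGetD dp (i-1) []) st.1 0
  then (st.1 - 1, st.2 ++ [st.1 - 1]) else st

def destek_temsilcisi_yonlendirme (musteri_talepleri : List Int) (temsilciler : List Int) (n : Int) (m : Int) : Int × List Int :=
  let dp := pvA_table musteri_talepleri temsilciler n m
  let en_yuksek_talepler := PySem.List.pyGetD (PySem.List.pyGetD dp n []) m 0
  let fin := (PySem.List.pyRange n 0 (-1)).foldl (pvA_tstep dp) (m, ([] : List Int))
  (en_yuksek_talepler, fin.2.reverse)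

-- ===== PORT B =====
-- Source B's best(i, j): the Python memo dict is a pure result cache (it is only ever read at a
-- key it was filled with, with exactly this recursion's value), so the port is the same
-- recursion without the cache.  The Python guard is 'i == 0'; Source B only ever calls best/pick
-- with 0 ≤ i (top call under Pre_, and i decreases to the base 0), and for i < 0 the Python
-- recursion would not return, so the total guard 'i ≤ 0' is exact wherever Source B returns.
def pvB_best (mt ts : List Int) (i j : Int) : Int :=
  if i ≤ 0 ∨ j = 0 then 0
  else
    let v := pvB_best mt ts (i-1) j
    if PySem.List.pyGetD ts (j-1) 0 ≥ PySem.List.pyGetD mt (i-1) 0 then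
      max v (pvB_best mt ts (i-1) (j-1) + PySem.List.pyGetD mt (i-1) 0)
    else v
termination_by i.toNat
decreasing_by all_goals omega

def pvB_pick (mt ts : List Int) (i j : Int) : List Int :=
  if i ≤ 0 ∨ j = 0 then []
  else if PySem.List.pyGetD ts (j-1) 0 ≥ PySem.List.pyGetD mt (i-1) 0 ∧
          pvB_best mt ts (i-1) (j-1) + PySem.List.pyGetD mt (i-1) 0 > pvB_best mt ts (i-1) j then
    pvB_pick mt ts (i-1) (j-1) ++ [j-1]
  else pvB_pick mt ts (i-1) j
termination_by i.toNat
decreasing_by all_goals omega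

def destek_temsilcisi_yonlendirme_alt (musteri_talepleri : List Int) (temsilciler : List Int) (n : Int) (m : Int) : Int × List Int :=
  (pvB_best musteri_talepleri temsilciler n m, pvB_pick musteri_talepleri temsilciler n m)

-- ===== PRECONDITION & SPEC =====
-- Pre_ keeps exactly the inputs on which A returns without an IndexError: 0 ≤ n and 0 ≤ m
-- (else dp[n][m] is read out of range), and when both loops run (n ≥ 1 and m ≥ 1) every
-- mt[i-1] / ts[j-1] read is in range.
def Pre_destek_temsilcisi_yonlendirme (musteri_talepleri : List Int) (temsilciler : List Int) (n : Int) (m : Int) : Prop :=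
  0 ≤ n ∧ 0 ≤ m ∧ (n = 0 ∨ m = 0 ∨ (n ≤ (musteri_talepleri.length : Int) ∧ m ≤ (temsilciler.length : Int)))
instance (musteri_talepleri : List Int) (temsilciler : List Int) (n : Int) (m : Int) : Decidable (Pre_destek_temsilcisi_yonlendirme musteri_talepleri temsilciler n m) := by unfold Pre_destek_temsilcisi_yonlendirme; infer_instance
def pvWitness_destek_temsilcisi_yonlendirme : List Int × List Int × Int × Int := ([3, 1, 4], [2, 5], 3, 2)
def Spec_destek_temsilcisi_yonlendirme (musteri_talepleri : List Int) (temsilciler : List Int) (n : Int) (m : Int) (out : Int × List Int) : Prop := out = destek_temsilcisi_yonlendirme_alt musteri_talepleri temsilciler n m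
instance (musteri_talepleri : List Int) (temsilciler : List Int) (n : Int) (m : Int) (out : Int × List Int) : Decidable (Spec_destek_temsilcisi_yonlendirme musteri_talepleri temsilciler n m out) := by unfold Spec_destek_temsilcisi_yonlendirme; infer_instance

-- ===== CLAIM (what is proved, stated in full; the proofs are below) =====
def Claim_equal_destek_temsilcisi_yonlendirme : Prop := ∀ (musteri_talepleri : List Int) (temsilciler : List Int) (n : Int) (m : Int), Dom_destek_temsilcisi_yonlendirme musteri_talepleri temsilciler n m → Pre_destek_temsilcisi_yonlendirme musteri_talepleri temsilciler n m → Spec_destek_temsilcisi_yonlendirme musteri_talepleri temsilciler n m (destek_temsilcisi_yonlendirme musteri_talepleri temsilciler n m)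

-- ===== LEMMAS AND PROOFS =====

-- The common mathematical recurrence both versions compute: pvSol i j = dp[i][j].
def pvSol (mt ts : List Int) : Nat → Int → Int
  | 0, _ => 0
  | (i+1), j =>
    if j ≤ 0 then 0
    else if PySem.List.pyGetD ts (j-1) 0 ≥ PySem.List.pyGetD mt (i : Int) 0 then
      max (pvSol mt ts i j) (pvSol mt ts i (j-1) + PySem.List.pyGetD mt (i : Int) 0)
    else pvSol mt ts i j

def pvRow (mt ts : List Int) (m r : Nat) : List Int := (List.range (m+1)).map (fun (j : Nat) => pvSol mt ts r (j : Int))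

-- The common traceback, read off pvSol (in A's append order).
def pvTrace (mt ts : List Int) : Nat → Int → List Int
  | 0, _ => []
  | (i+1), j =>
    if pvSol mt ts (i+1) j ≠ pvSol mt ts i j then (j-1) :: pvTrace mt ts i (j-1)
    else pvTrace mt ts i j

theorem pvSol_nonpos (mt ts : List Int) (i : Nat) {j : Int} (h : j ≤ 0) : pvSol mt ts i j = 0 := by
  cases i <;> simp [pvSol, h]

theorem pvGetD_map_range {α : Type} (f : Nat → α) (N k : Nat) (d : α) (h : k < N) :
    PySem.List.pyGetD ((List.range N).map f) (k : Int) d = f k := by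
  simp [PySem.List.pyGetD_natCast, List.getD, h]

theorem set_map_range {α : Type} (f : Nat → α) (N k : Nat) (v : α) (h : k < N) :
    (((List.range N).map f).set k v) = (List.range N).map (fun r => if r = k then v else f r) := by
  apply List.ext_getElem
  · simp
  · intro i h1 h2
    rw [List.getElem_set]
    simp only [List.getElem_map, List.getElem_range]
    rcases eq_or_ne i k with rfl | hne
    · simp
    · simp [hne, Ne.symm hne]

theorem map_range_congr {α : Type} (f g : Nat → α) (N : Nat) (h : ∀ r, r < N → f r = g r) :
    (List.range N).map f = (List.range N).map g := by
  apply List.map_congr_left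
  intro a ha
  exact h a (List.mem_range.mp ha)

-- ===== A side: the nested folds build the pvRow rows =====
theorem pvA_inner_eq (mt ts : List Int) (N M t : Nat) (ht : t < N) :
    ∀ s : Nat, s ≤ M →
      (PySem.List.pyRange 1 ((s : Int)+1) 1).foldl
        (fun dp j => dp.set ((t : Int)+1).toNat ((PySem.List.pyGetD dp ((t : Int)+1) []).set j.toNat (pvA_cell mt ts dp ((t : Int)+1) j)))
        ((List.range (N+1)).map (fun r => if r ≤ t then pvRow mt ts M r else List.replicate (M+1) 0))
      = (List.range (N+1)).map (fun r =>
          if r = t+1 then (List.range (M+1)).map (fun (j : Nat) => if (j : Int) ≤ (s : Int) then pvSol mt ts (t+1) (j : Int) else 0)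
          else if r ≤ t then pvRow mt ts M r else List.replicate (M+1) 0) := by
  intro s
  induction s with
  | zero =>
    intro _
    rw [show ((0 : Nat) : Int) + 1 = 1 by norm_num, PySem.List.pyRange_one_eq_nil le_rfl]
    simp only [List.foldl_nil]
    apply map_range_congr
    intro r _
    rcases eq_or_ne r (t+1) with rfl | hne
    · simp only [show ¬ (t+1 ≤ t) by omega, if_false, if_pos]
      rw [map_range_congr _ (fun _ => (0 : Int)) _ ?_]
      · simp [List.map_const']
      · intro j _
        rcases eq_or_ne j 0 with rfl | hj
        · rw [if_pos le_rfl]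
          exact pvSol_nonpos mt ts (t+1) (by simp)
        · rw [if_neg (by omega)]
    · simp [hne]
  | succ s ih =>
    intro hs
    have hs' : s ≤ M := Nat.le_of_succ_le hs
    rw [show ((s+1 : Nat) : Int) + 1 = ((s : Int) + 1) + 1 by push_cast; ring,
        PySem.List.pyRange_one_succ_right (by omega), List.foldl_append, ih hs']
    simp only [List.foldl_cons, List.foldl_nil]
    have hrow : PySem.List.pyGetD ((List.range (N+1)).map (fun r =>
          if r = t+1 then (List.range (M+1)).map (fun (j : Nat) => if (j : Int) ≤ (s : Int) then pvSol mt ts (t+1) (j : Int) else 0)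
          else if r ≤ t then pvRow mt ts M r else List.replicate (M+1) 0)) ((t : Int)+1) []
        = (List.range (M+1)).map (fun (j : Nat) => if (j : Int) ≤ (s : Int) then pvSol mt ts (t+1) (j : Int) else 0) := by
      rw [show ((t : Int)+1) = ((t+1 : Nat) : Int) by push_cast; ring,
          pvGetD_map_range _ (N+1) (t+1) _ (by omega)]
      simp
    have hprevrow : PySem.List.pyGetD ((List.range (N+1)).map (fun r =>
          if r = t+1 then (List.range (M+1)).map (fun (j : Nat) => if (j : Int) ≤ (s : Int) then pvSol mt ts (t+1) (j : Int) else 0)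
          else if r ≤ t then pvRow mt ts M r else List.replicate (M+1) 0)) ((t : Int)+1-1) []
        = pvRow mt ts M t := by
      rw [show ((t : Int)+1-1) = ((t : Nat) : Int) by ring,
          pvGetD_map_range _ (N+1) t _ (by omega)]
      simp
    have hcell : pvA_cell mt ts ((List.range (N+1)).map (fun r =>
          if r = t+1 then (List.range (M+1)).map (fun (j : Nat) => if (j : Int) ≤ (s : Int) then pvSol mt ts (t+1) (j : Int) else 0)
          else if r ≤ t then pvRow mt ts M r else List.replicate (M+1) 0)) ((t : Int)+1) ((s : Int)+1)
        = pvSol mt ts (t+1) ((s : Int)+1) := by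
      unfold pvA_cell
      rw [hprevrow]
      have h1 : PySem.List.pyGetD (pvRow mt ts M t) ((s : Int)+1) 0 = pvSol mt ts t ((s : Int)+1) := by
        unfold pvRow
        rw [show ((s : Int)+1) = ((s+1 : Nat) : Int) by push_cast; ring,
            pvGetD_map_range _ (M+1) (s+1) _ (by omega)]
      have h2 : PySem.List.pyGetD (pvRow mt ts M t) ((s : Int)+1-1) 0 = pvSol mt ts t (s : Int) := by
        unfold pvRow
        rw [show ((s : Int)+1-1) = ((s : Nat) : Int) by ring,
            pvGetD_map_range _ (M+1) s _ (by omega)]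
      rw [h1, h2, show pvSol mt ts (t+1) ((s : Int)+1) = _ from rfl, pvSol]
      simp only [show ¬ ((s : Int) + 1 ≤ 0) by omega, if_false, add_sub_cancel_right]
    rw [hrow, hcell, show ((s : Int)+1).toNat = s+1 by omega, show ((t : Int)+1).toNat = t+1 by omega,
        set_map_range _ (M+1) (s+1) _ (by omega), set_map_range _ (N+1) (t+1) _ (by omega)]
    apply map_range_congr
    intro r _
    rcases eq_or_ne r (t+1) with rfl | hne
    · simp only [if_pos]
      apply map_range_congr
      intro j _
      rcases eq_or_ne j (s+1) with rfl | hj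
      · simp
      · have hiff : ((j : Int) ≤ ((s+1 : Nat) : Int)) = ((j : Int) ≤ (s : Int)) := by
          have : j ≤ s + 1 ↔ j ≤ s := by omega
          push_cast
          simp only [eq_iff_iff]
          omega
        simp only [hj, if_false, hiff]
    · simp [hne]

theorem pvA_table_eq (mt ts : List Int) (N M : Nat) :
    ∀ t : Nat, t ≤ N →
      (PySem.List.pyRange 1 ((t : Int)+1) 1).foldl (fun dp i => pvA_inner mt ts (M : Int) i dp) (pvA_dp0 (N : Int) (M : Int))
      = (List.range (N+1)).map (fun r => if r ≤ t then pvRow mt ts M r else List.replicate (M+1) 0) := by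
  have hrow0 : pvRow mt ts M 0 = List.replicate (M+1) (0 : Int) := by
    unfold pvRow
    rw [map_range_congr _ (fun _ => (0 : Int)) _ (fun j _ => by simp [pvSol])]
    simp [List.map_const']
  intro t
  induction t with
  | zero =>
    intro _
    rw [show ((0 : Nat) : Int) + 1 = 1 by norm_num, PySem.List.pyRange_one_eq_nil le_rfl]
    simp only [List.foldl_nil]
    unfold pvA_dp0
    rw [PySem.List.pyRange_one 0 ((N : Int)+1), List.map_map,
        show (((N : Int)+1) - 0).toNat = N+1 by omega, show (((M : Int))+1).toNat = M+1 by omega]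
    apply map_range_congr
    intro r _
    rcases eq_or_ne r 0 with rfl | hr
    · simp [hrow0]
    · simp [show ¬ (r ≤ 0) by omega]
  | succ t ih =>
    intro ht
    have ht' : t ≤ N := Nat.le_of_succ_le ht
    rw [show ((t+1 : Nat) : Int) + 1 = ((t : Int) + 1) + 1 by push_cast; ring,
        PySem.List.pyRange_one_succ_right (by omega), List.foldl_append, ih ht']
    simp only [List.foldl_cons, List.foldl_nil]
    unfold pvA_inner
    rw [pvA_inner_eq mt ts N M t (by omega) M le_rfl]
    apply map_range_congr
    intro r _
    rcases eq_or_ne r (t+1) with rfl | hne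
    · simp only [show t+1 ≤ t+1 from le_rfl, if_pos]
      unfold pvRow
      apply map_range_congr
      intro j hj
      rw [if_pos (by omega : (j : Int) ≤ (M : Int))]
    · rcases le_or_gt r t with hrt | hrt
      · simp [hne, hrt, Nat.le_succ_of_le hrt]
      · simp [hne, show ¬ (r ≤ t) by omega, show ¬ (r ≤ t+1) by omega]

theorem pvA_table_spec (mt ts : List Int) (N M : Nat) :
    pvA_table mt ts (N : Int) (M : Int) = (List.range (N+1)).map (pvRow mt ts M) := by
  unfold pvA_table
  exact (pvA_table_eq mt ts N M N le_rfl).trans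
    (map_range_congr _ _ _ (fun r hr => by rw [if_pos (by omega)]))

theorem pvRow_read (mt ts : List Int) (M r : Nat) (j : Int) (h0 : 0 ≤ j) (hm : j ≤ (M : Int)) :
    PySem.List.pyGetD (pvRow mt ts M r) j 0 = pvSol mt ts r j := by
  obtain ⟨j', rfl⟩ : ∃ j' : Nat, j = (j' : Int) := ⟨j.toNat, (Int.toNat_of_nonneg h0).symm⟩
  unfold pvRow
  exact pvGetD_map_range _ _ _ _ (by omega)

theorem pvA_read (mt ts : List Int) (N M : Nat) (i : Nat) (j : Int) (hi : i ≤ N) (h0 : 0 ≤ j) (hm : j ≤ (M : Int)) :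
    PySem.List.pyGetD (PySem.List.pyGetD (pvA_table mt ts (N : Int) (M : Int)) (i : Int) []) j 0 = pvSol mt ts i j := by
  rw [pvA_table_spec, pvGetD_map_range _ (N+1) i _ (by omega)]
  exact pvRow_read mt ts M i j h0 hm

-- ===== A's traceback reads off pvTrace =====
theorem traceA_eq (mt ts : List Int) (N M : Nat) :
    ∀ (k : Nat) (j : Int) (sel : List Int), k ≤ N → 0 ≤ j → j ≤ (M : Int) →
      ((PySem.List.pyRange (k : Int) 0 (-1)).foldl (pvA_tstep (pvA_table mt ts (N : Int) (M : Int))) (j, sel)).2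
      = sel ++ pvTrace mt ts k j := by
  intro k
  induction k with
  | zero =>
    intro j sel _ _ _
    rw [show ((0 : Nat) : Int) = 0 from rfl, PySem.List.pyRange_neg_one_eq_nil le_rfl]
    simp [pvTrace]
  | succ k ih =>
    intro j sel hk hj0 hjm
    rw [PySem.List.pyRange_neg_one_cons (by omega : (0 : Int) < ((k+1 : Nat) : Int))]
    simp only [List.foldl_cons]
    have hk' : k ≤ N := Nat.le_of_succ_le hk
    have hstep : pvA_tstep (pvA_table mt ts (N : Int) (M : Int)) (j, sel) ((k+1 : Nat) : Int)
        = if pvSol mt ts (k+1) j ≠ pvSol mt ts k j then (j-1, sel ++ [j-1]) else (j, sel) := by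
      unfold pvA_tstep
      rw [pvA_read mt ts N M (k+1) j hk hj0 hjm,
          show ((k+1 : Nat) : Int) - 1 = ((k : Nat) : Int) by push_cast; ring,
          pvA_read mt ts N M k j hk' hj0 hjm]
    rw [hstep, show ((k+1 : Nat) : Int) - 1 = ((k : Nat) : Int) by push_cast; ring]
    by_cases hc : pvSol mt ts (k+1) j ≠ pvSol mt ts k j
    · have hjpos : 0 < j := by
        by_contra hle
        exact hc (by rw [pvSol_nonpos mt ts (k+1) (by omega), pvSol_nonpos mt ts k (by omega)])
      rw [if_pos hc, ih (j-1) (sel ++ [j-1]) hk' (by omega) (by omega)]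
      rw [pvTrace, if_pos hc]
      simp
    · rw [if_neg hc, ih j sel hk' hj0 hjm, pvTrace, if_neg hc]

-- ===== B side: best computes pvSol, pick computes pvTrace reversed =====
theorem pvB_best_eq (mt ts : List Int) :
    ∀ (i : Nat) (j : Int), 0 ≤ j → pvB_best mt ts (i : Int) j = pvSol mt ts i j := by
  intro i
  induction i with
  | zero =>
    intro j _
    rw [pvB_best]
    simp [pvSol]
  | succ i ih =>
    intro j hj
    rw [pvB_best]
    rcases eq_or_ne j 0 with rfl | hjne
    · rw [if_pos (Or.inr rfl), pvSol, if_pos le_rfl]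
    · rw [if_neg (by push_cast; omega),
          show ((i+1 : Nat) : Int) - 1 = ((i : Nat) : Int) by push_cast; ring,
          ih j hj, ih (j-1) (by omega),
          pvSol, if_neg (by omega : ¬ j ≤ 0)]

theorem pvTrace_nonpos (mt ts : List Int) : ∀ (i : Nat) {j : Int}, j ≤ 0 → pvTrace mt ts i j = [] := by
  intro i
  induction i with
  | zero => intro j _; rfl
  | succ i ih =>
    intro j hj
    rw [pvTrace, if_neg (by rw [pvSol_nonpos mt ts (i+1) hj, pvSol_nonpos mt ts i hj]; simp)]
    exact ih hj

theorem pvB_pick_eq (mt ts : List Int) :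
    ∀ (i : Nat) (j : Int), 0 ≤ j → pvB_pick mt ts (i : Int) j = (pvTrace mt ts i j).reverse := by
  intro i
  induction i with
  | zero => intro j _; rw [pvB_pick]; simp [pvTrace]
  | succ i ih =>
    intro j hj
    rcases eq_or_ne j 0 with rfl | hj0
    · rw [pvB_pick, if_pos (Or.inr rfl), pvTrace_nonpos mt ts (i+1) le_rfl]
      rfl
    · have hjpos : 0 < j := by omega
      rw [pvB_pick, if_neg (by push_cast; omega),
          show ((i+1 : Nat) : Int) - 1 = ((i : Nat) : Int) by push_cast; ring,
          pvB_best_eq mt ts i (j-1) (by omega), pvB_best_eq mt ts i j hj]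
      have hcond : (PySem.List.pyGetD ts (j-1) 0 ≥ PySem.List.pyGetD mt (i : Int) 0 ∧
            pvSol mt ts i (j-1) + PySem.List.pyGetD mt (i : Int) 0 > pvSol mt ts i j)
          ↔ pvSol mt ts (i+1) j ≠ pvSol mt ts i j := by
        rw [show pvSol mt ts (i+1) j = _ from rfl, pvSol, if_neg (by omega : ¬ j ≤ 0)]
        constructor
        · rintro ⟨hfe, hgt⟩
          rw [if_pos hfe]
          omega
        · intro hne
          by_cases hfe : PySem.List.pyGetD ts (j-1) 0 ≥ PySem.List.pyGetD mt (i : Int) 0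
          · rw [if_pos hfe] at hne
            exact ⟨hfe, by omega⟩
          · rw [if_neg hfe] at hne
            exact absurd rfl hne
      by_cases hc : pvSol mt ts (i+1) j ≠ pvSol mt ts i j
      · rw [if_pos (hcond.mpr hc), ih (j-1) (by omega), pvTrace, if_pos hc]
        simp
      · rw [if_neg (fun h => hc (hcond.mp h)), ih j hj, pvTrace, if_neg hc]

-- ===== VERDICT (by name: the statement is the Claim_ definition above) =====
theorem destek_temsilcisi_yonlendirme_spec : Claim_equal_destek_temsilcisi_yonlendirme := by
  intro mt ts n m _ hpre
  obtain ⟨hn, hm, -⟩ := hpre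
  unfold Spec_destek_temsilcisi_yonlendirme
  obtain ⟨N, rfl⟩ : ∃ N : Nat, n = (N : Int) := ⟨n.toNat, (Int.toNat_of_nonneg hn).symm⟩
  obtain ⟨M, rfl⟩ : ∃ M : Nat, m = (M : Int) := ⟨m.toNat, (Int.toNat_of_nonneg hm).symm⟩
  unfold destek_temsilcisi_yonlendirme destek_temsilcisi_yonlendirme_alt
  have hA := pvA_read mt ts N M N (M : Int) le_rfl (by positivity) le_rfl
  have hTA := traceA_eq mt ts N M N (M : Int) [] le_rfl (by positivity) le_rfl
  have hB := pvB_best_eq mt ts N (M : Int) (by positivity)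
  have hP := pvB_pick_eq mt ts N (M : Int) (by positivity)
  simp only [hTA, List.nil_append, Prod.mk.injEq]
  exact ⟨hA.trans hB.symm, (congrArg List.reverse rfl).trans hP.symm⟩
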